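-- pv_equiv track=rewrite | github.com/scott-sattler/coachable | DS&A Crash Course/Week 4/Week 4 Coding Quiz F.py | question12
-- ===== SOURCE A (Python) =====
-- def question12(input_string: str) -> str:
--     inp = input_string
--     n = len(inp)
--     processed = []
--
--     for i in range(n):
--         if i % 2 == 0:
--             processed.append(inp[i])
--             continue
--
--         processed.append(inp[i].capitalize())
--
--     return ''.join(processed)
-- ===== SOURCE B (Python) =====
-- def question12(input_string: str) -> str:
--     chars = list(input_string)
--     chars[1::2] = [c.capitalize() for c in chars[1::2]]
--     return ''.join(chars)
-- ===== Notes on version B (the rewrite author's own statement) =====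
-- stated objective: idiomatic
-- what changed: Replaces the index loop with a parity branch by a strided-slice assignment: the odd-index characters are selected up front with chars[1::2], capitalized, and written back in place.
import Mathlib
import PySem

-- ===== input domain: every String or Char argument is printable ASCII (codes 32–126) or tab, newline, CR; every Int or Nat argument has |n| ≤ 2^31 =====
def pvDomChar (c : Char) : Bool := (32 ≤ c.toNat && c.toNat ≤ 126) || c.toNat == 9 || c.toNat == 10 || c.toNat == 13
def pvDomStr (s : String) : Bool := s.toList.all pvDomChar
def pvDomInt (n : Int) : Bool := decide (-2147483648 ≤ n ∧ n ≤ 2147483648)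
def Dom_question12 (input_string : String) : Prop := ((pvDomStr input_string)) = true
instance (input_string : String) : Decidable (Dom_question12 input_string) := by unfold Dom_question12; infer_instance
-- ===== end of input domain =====

-- B capitalizes the odd-index characters via a strided-slice assignment instead of A's
-- index loop with a parity branch (idiomatic; same cost; return value only, no mutation).

-- ===== PORT A =====
-- inp[i].capitalize() on a one-character slice is exactly upperChar of that character
-- (exact on the ASCII domain).
def question12 (input_string : String) : String :=
  let inp := input_string.toList
  let n : Int := inp.length
  let processed :=
    (PySem.List.pyRange 0 n 1).foldl
      (fun acc i =>
        if PySem.Int.mod i 2 = 0 then acc ++ [PySem.List.pyGetD inp i ' ']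
        else acc ++ [PySem.Chars.upperChar (PySem.List.pyGetD inp i ' ')]) []
  String.ofList processed

-- ===== PORT B =====
-- hand port of the strided slice chars[1::2]: exactly the elements at indices 1,3,5,…
def pvOdds : List Char → List Char
  | _ :: y :: r => y :: pvOdds r
  | _ => []

-- hand port of the slice assignment chars[1::2] = us (with us of matching length):
-- writes us back into the odd positions, keeping even positions.
def pvWeave : List Char → List Char → List Char
  | x :: _ :: r, u :: us => x :: u :: pvWeave r us
  | xs, _ => xs

def question12_alt (input_string : String) : String :=
  let chars := input_string.toList
  String.ofList (pvWeave chars ((pvOdds chars).map PySem.Chars.upperChar))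

-- ===== PRECONDITION & SPEC =====
def Spec_question12 (input_string : String) (out : String) : Prop := out = question12_alt input_string
instance (input_string : String) (out : String) : Decidable (Spec_question12 input_string out) := by unfold Spec_question12; infer_instance

-- ===== CLAIM (what is proved, stated in full; the proofs are below) =====
def Claim_equal_question12 : Prop := ∀ (input_string : String), Dom_question12 input_string → Spec_question12 input_string (question12 input_string)

-- ===== LEMMAS AND PROOFS =====

-- main combinatorial lemma: the per-index parity map over range' s, applied to the
-- suffix r of the scanned list (r.getD (k - s)), is B's weave of r with its capitalized odds
theorem pv_aux :
    ∀ (r : List Char) (s : Nat), s % 2 = 0 →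
      (List.range' s r.length).map
        (fun k => if k % 2 = 0 then r.getD (k - s) ' '
                  else PySem.Chars.upperChar (r.getD (k - s) ' '))
      = pvWeave r ((pvOdds r).map PySem.Chars.upperChar)
  | [], s, _ => by simp [pvWeave]
  | [x], s, hs => by
      simp [pvWeave, hs]
  | x :: y :: r, s, hs => by
      have h1 : (s + 1) % 2 = 1 := by omega
      have hrec := pv_aux r (s + 2) (by omega)
      simp only [List.length_cons, List.range'_succ, List.map_cons, hs, h1]
      simp only [Nat.sub_self]
      have h2 : s + 1 - s = 1 := by omega
      rw [h2]
      simp only [List.getD_cons_zero, List.getD_cons_succ, pvWeave, pvOdds, List.map_cons]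
      congr 1
      congr 1
      have : (List.range' (s + 1 + 1) r.length).map
          (fun k => if k % 2 = 0 then (x :: y :: r).getD (k - s) ' '
                    else PySem.Chars.upperChar ((x :: y :: r).getD (k - s) ' '))
          = (List.range' (s + 2) r.length).map
          (fun k => if k % 2 = 0 then r.getD (k - (s + 2)) ' '
                    else PySem.Chars.upperChar (r.getD (k - (s + 2)) ' ')) := by
        apply List.map_congr_left
        intro k hk
        have hk2 : s + 2 ≤ k := (List.mem_range'_1.mp hk).1
        have e1 : k - s = (k - (s + 2)) + 1 + 1 := by omega
        rw [e1]
        simp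
      rw [this, hrec]

theorem pv_main (cs : List Char) :
    (List.range cs.length).map
      (fun k => if k % 2 = 0 then cs.getD k ' ' else PySem.Chars.upperChar (cs.getD k ' '))
    = pvWeave cs ((pvOdds cs).map PySem.Chars.upperChar) := by
  have := pv_aux cs 0 rfl
  simpa [List.range_eq_range'] using this

-- ===== VERDICT (by name: the statement is the Claim_ definition above) =====
theorem question12_spec : Claim_equal_question12 := by
  intro s _
  unfold Spec_question12 question12 question12_alt
  simp only []
  congr 1
  -- turn the loop into a map over the range
  have hfold :
      (fun (acc : List Char) (i : Int) =>
        if PySem.Int.mod i 2 = 0 then acc ++ [PySem.List.pyGetD s.toList i ' ']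
        else acc ++ [PySem.Chars.upperChar (PySem.List.pyGetD s.toList i ' ')])
      = (fun acc i => acc ++
          [if PySem.Int.mod i 2 = 0 then PySem.List.pyGetD s.toList i ' '
           else PySem.Chars.upperChar (PySem.List.pyGetD s.toList i ' ')]) := by
    funext acc i; split_ifs <;> rfl
  rw [hfold, PySem.List.foldl_append_singleton_eq_map, List.nil_append,
    PySem.List.pyRange_one, List.map_map]
  have hcast : ((s.toList.length : Int) - 0).toNat = s.toList.length := by simp
  rw [hcast]
  have hfun :
      ((fun i => if PySem.Int.mod i 2 = 0 then PySem.List.pyGetD s.toList i ' '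
                 else PySem.Chars.upperChar (PySem.List.pyGetD s.toList i ' '))
        ∘ fun (k : Nat) => (0 : Int) + ↑k)
      = fun k => if k % 2 = 0 then s.toList.getD k ' '
                 else PySem.Chars.upperChar (s.toList.getD k ' ') := by
    funext k
    simp only [Function.comp, Int.zero_add, PySem.List.pyGetD_natCast]
    have : PySem.Int.mod (↑k) 2 = ((k % 2 : Nat) : Int) := PySem.Int.mod_natCast k 2
    rw [this]
    rcases Nat.mod_two_eq_zero_or_one k with h | h <;> simp [h]
  rw [hfun, pv_main]
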